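-- pv_equiv track=rewrite | github.com/cmh32/otology-search | scripts/upload.py | choose_primary_key
-- ===== SOURCE A (Python) =====
-- def choose_primary_key(documents, preferred: str):
--     if preferred:
--         return preferred, documents
--
--     candidates = ["id", "uid", "_id", "slug", "url", "courseID", "courseId", "course_id"]
--     for candidate in candidates:
--         values = [doc.get(candidate) for doc in documents]
--         if any(value in (None, "") for value in values):
--             continue
--         if len({str(value) for value in values}) == len(documents):
--             return candidate, documents
--
--     rewritten = []
--     for index, doc in enumerate(documents, start=1):
--         updated = dict(doc)
--         updated["id"] = f"doc-{index:05d}"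
--         rewritten.append(updated)
--     return "id", rewritten
-- ===== SOURCE B (Python) =====
-- def choose_primary_key(documents, preferred: str):
--     if preferred:
--         return preferred, documents
--
--     candidates = ["id", "uid", "_id", "slug", "url", "courseID", "courseId", "course_id"]
--     # One tabulating pass over the documents: per candidate, the set of
--     # distinct str(value)s and a flag telling whether a missing/empty value was seen.
--     seen = {c: set() for c in candidates}
--     missing = {c: False for c in candidates}
--     for doc in documents:
--         for c in candidates:
--             value = doc.get(c)
--             if value in (None, ""):
--                 missing[c] = True
--             else:
--                 seen[c].add(str(value))
--
--     n = len(documents)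
--     for c in candidates:
--         if not missing[c] and len(seen[c]) == n:
--             return c, documents
--
--     return "id", [{**doc, "id": "doc-%05d" % i}
--                   for i, doc in enumerate(documents, 1)]
-- ===== Notes on version B (the rewrite author's own statement) =====
-- stated objective: alternative
-- what changed: Replaces the candidate-by-candidate rescans of all documents with a single tabulating pass that builds, per candidate, a set of seen values and a missing/empty flag, followed by an O(8) selection in priority order; the rewrite branch becomes an enumerate-based comprehension.
import Mathlib
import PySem

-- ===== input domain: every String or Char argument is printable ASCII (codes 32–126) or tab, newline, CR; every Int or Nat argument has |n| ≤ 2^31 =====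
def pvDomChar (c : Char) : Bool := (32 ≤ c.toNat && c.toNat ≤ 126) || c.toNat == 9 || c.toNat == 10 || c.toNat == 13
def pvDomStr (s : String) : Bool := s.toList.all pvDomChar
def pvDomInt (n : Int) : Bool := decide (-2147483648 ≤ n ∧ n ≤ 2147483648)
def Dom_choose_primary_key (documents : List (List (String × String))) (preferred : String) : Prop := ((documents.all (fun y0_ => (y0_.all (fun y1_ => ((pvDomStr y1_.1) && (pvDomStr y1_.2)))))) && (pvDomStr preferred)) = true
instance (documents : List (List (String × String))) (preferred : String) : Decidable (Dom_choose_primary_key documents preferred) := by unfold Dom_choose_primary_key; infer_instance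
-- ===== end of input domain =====

-- B replaces A's per-candidate rescans of the documents by one tabulating pass
-- (per candidate: a set of seen values plus a missing/empty flag) followed by a
-- selection over the eight candidates in priority order; same return value everywhere.

-- ===== PORT A =====

-- f"doc-{index:05d}" (index here is always ≥ 1)
def pvFmtId (i : Int) : String :=
  let s := PySem.Int.toChars i
  String.ofList ("doc-".toList ++ List.replicate (5 - s.length) '0' ++ s)

-- str(value) for value : Optional[str]
def pvStrOfOpt (v : Option String) : String :=
  match v with
  | none => "None"
  | some s => s

-- value in (None, "")
def pvIsEmptyVal (v : Option String) : Bool :=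
  match v with
  | none => true
  | some s => s == ""

-- A's candidate loop: first candidate whose values are all non-empty and pairwise distinct
def pvFindCandidate (documents : List (List (String × String))) : List String → Option String
  | [] => none
  | c :: rest =>
    let values := documents.map (fun doc => PySem.Dict.get? (PySem.Dict.mk doc) c)
    if values.any pvIsEmptyVal then pvFindCandidate documents rest
    else if PySem.Set.len (PySem.Set.ofList (values.map pvStrOfOpt)) = documents.length then some c
    else pvFindCandidate documents rest

-- A's rewrite loop: enumerate(documents, start=1); updated = dict(doc); updated["id"] = f"doc-{index:05d}"
def pvRewrite : List (List (String × String)) → Int → List (List (String × String))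
  | [], _ => []
  | doc :: rest, i =>
      (((PySem.Dict.ofList doc).insert "id" (pvFmtId i)).items) :: pvRewrite rest (i + 1)

def choose_primary_key (documents : List (List (String × String))) (preferred : String) : String × (List (List (String × String))) :=
  if preferred ≠ "" then (preferred, documents)
  else
    match pvFindCandidate documents ["id", "uid", "_id", "slug", "url", "courseID", "courseId", "course_id"] with
    | some c => (c, documents)
    | none => ("id", pvRewrite documents 1)

-- ===== PORT B =====

-- one document updates the per-candidate (seen-set, missing-flag) table
def pvStep (st : List (String × PySem.Set String × Bool)) (doc : List (String × String)) : List (String × PySem.Set String × Bool) :=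
  st.map (fun e =>
    match PySem.Dict.get? (PySem.Dict.mk doc) e.1 with
    | none => (e.1, e.2.1, true)
    | some v => if v == "" then (e.1, e.2.1, true) else (e.1, PySem.Set.add e.2.1 v, e.2.2))

-- selection pass: first candidate with no missing value and len(seen) == n
def pvSelect (n : Nat) : List (String × PySem.Set String × Bool) → Option String
  | [] => none
  | e :: rest => if e.2.2 = false ∧ PySem.Set.len e.2.1 = n then some e.1 else pvSelect n rest

def choose_primary_key_alt (documents : List (List (String × String))) (preferred : String) : String × (List (List (String × String))) :=
  if preferred ≠ "" then (preferred, documents)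
  else
    let st := documents.foldl pvStep
      ((["id", "uid", "_id", "slug", "url", "courseID", "courseId", "course_id"]).map
        (fun c => (c, PySem.Set.empty, false)))
    match pvSelect documents.length st with
    | some c => (c, documents)
    | none =>
      ("id", (PySem.List.enumerate documents 1).map
        (fun p => ((PySem.Dict.ofList p.2).insert "id" (pvFmtId p.1)).items))

-- ===== PRECONDITION & SPEC =====
def Spec_choose_primary_key (documents : List (List (String × String))) (preferred : String) (out : String × (List (List (String × String)))) : Prop := out = choose_primary_key_alt documents preferred
instance (documents : List (List (String × String))) (preferred : String) (out : String × (List (List (String × String)))) : Decidable (Spec_choose_primary_key documents preferred out) := by unfold Spec_choose_primary_key; infer_instance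

-- ===== CLAIM (what is proved, stated in full; the proofs are below) =====
def Claim_equal_choose_primary_key : Prop := ∀ (documents : List (List (String × String))) (preferred : String), Dom_choose_primary_key documents preferred → Spec_choose_primary_key documents preferred (choose_primary_key documents preferred)

-- ===== LEMMAS AND PROOFS =====

-- state of ONE candidate after B's pass over docs
def pvG (c : String) : List (List (String × String)) → PySem.Set String → Bool → PySem.Set String × Bool
  | [], s, b => (s, b)
  | doc :: rest, s, b =>
    match PySem.Dict.get? (PySem.Dict.mk doc) c with
    | none => pvG c rest s true
    | some v => if v == "" then pvG c rest s true else pvG c rest (PySem.Set.add s v) b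

theorem pvFoldl_step (docs : List (List (String × String))) (st : List (String × PySem.Set String × Bool)) :
    docs.foldl pvStep st = st.map (fun e => (e.1, pvG e.1 docs e.2.1 e.2.2)) := by
  induction docs generalizing st with
  | nil => simp [pvG]
  | cons d rest ih =>
    rw [List.foldl_cons, ih]
    show (pvStep st d).map _ = _
    simp only [pvStep, List.map_map]
    apply List.map_congr_left
    intro e _
    simp only [Function.comp]
    cases h : PySem.Dict.get? (PySem.Dict.mk d) e.1 with
    | none => simp [pvG, h]
    | some v =>
      by_cases hv : v = ""
      · simp [pvG, h, hv]
      · simp [pvG, h, hv]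

theorem pvG_flag (c : String) (docs : List (List (String × String))) (s : PySem.Set String) (b : Bool) :
    (pvG c docs s b).2 = (b || docs.any (fun doc => pvIsEmptyVal (PySem.Dict.get? (PySem.Dict.mk doc) c))) := by
  induction docs generalizing s b with
  | nil => simp [pvG]
  | cons d rest ih =>
    cases h : PySem.Dict.get? (PySem.Dict.mk d) c with
    | none => simp [pvG, h, ih, pvIsEmptyVal]
    | some v =>
      have hvb := Bool.beq_eq_decide_eq v ""
      by_cases hv : v = ""
      · simp [pvG, h, hv, ih, pvIsEmptyVal]
      · simp [pvG, h, hv, ih, pvIsEmptyVal, hvb]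

theorem pvG_of_no_empty (c : String) (docs : List (List (String × String))) (s : PySem.Set String) (b : Bool)
    (h : docs.any (fun doc => pvIsEmptyVal (PySem.Dict.get? (PySem.Dict.mk doc) c)) = false) :
    pvG c docs s b = (docs.foldl (fun s doc => PySem.Set.add s (pvStrOfOpt (PySem.Dict.get? (PySem.Dict.mk doc) c))) s, b) := by
  induction docs generalizing s with
  | nil => simp [pvG]
  | cons d rest ih =>
    simp only [List.any_cons, Bool.or_eq_false_iff] at h
    obtain ⟨h1, h2⟩ := h
    cases hd : PySem.Dict.get? (PySem.Dict.mk d) c with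
    | none => simp [hd, pvIsEmptyVal] at h1
    | some v =>
      simp only [hd, pvIsEmptyVal, beq_eq_false_iff_ne, ne_eq] at h1
      simp [pvG, hd, h1, ih _ h2, pvStrOfOpt]

theorem pvSelect_eq_find (docs : List (List (String × String))) (cs : List String) :
    pvSelect docs.length (cs.map (fun c => (c, pvG c docs PySem.Set.empty false))) = pvFindCandidate docs cs := by
  induction cs with
  | nil => simp [pvSelect, pvFindCandidate]
  | cons c rest ih =>
    simp only [List.map_cons]
    show (if (pvG c docs PySem.Set.empty false).2 = false ∧
            PySem.Set.len (pvG c docs PySem.Set.empty false).1 = docs.length then some c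
          else pvSelect docs.length (rest.map _)) = _
    rw [pvFindCandidate]
    by_cases hany : docs.any (fun doc => pvIsEmptyVal (PySem.Dict.get? (PySem.Dict.mk doc) c)) = true
    · have hne : ¬ ((pvG c docs PySem.Set.empty false).2 = false ∧
          PySem.Set.len (pvG c docs PySem.Set.empty false).1 = docs.length) := by
        rw [pvG_flag]; simp [hany]
      rw [if_neg hne]
      have hany' : (docs.map (fun doc => PySem.Dict.get? (PySem.Dict.mk doc) c)).any pvIsEmptyVal = true := by
        simpa [List.any_map, Function.comp] using hany
      simp only [hany', if_true]
      exact ih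
    · have hany' : docs.any (fun doc => pvIsEmptyVal (PySem.Dict.get? (PySem.Dict.mk doc) c)) = false := by
        simpa using hany
      have hmapany : (docs.map (fun doc => PySem.Dict.get? (PySem.Dict.mk doc) c)).any pvIsEmptyVal = false := by
        simpa [List.any_map, Function.comp] using hany'
      have hset : PySem.Set.ofList ((docs.map (fun doc => PySem.Dict.get? (PySem.Dict.mk doc) c)).map pvStrOfOpt)
          = docs.foldl (fun s doc => PySem.Set.add s (pvStrOfOpt (PySem.Dict.get? (PySem.Dict.mk doc) c))) PySem.Set.empty := by
        rw [PySem.Set.ofList_eq_foldl, List.map_map, List.foldl_map]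
        rfl
      have hcond : (false = false ∧ PySem.Set.len (docs.foldl (fun s doc => PySem.Set.add s (pvStrOfOpt (PySem.Dict.get? (PySem.Dict.mk doc) c))) PySem.Set.empty) = (docs.length : Int)) ↔ (PySem.Set.len (PySem.Set.ofList ((docs.map (fun doc => PySem.Dict.get? (PySem.Dict.mk doc) c)).map pvStrOfOpt)) = (docs.length : Int)) := by
        rw [hset]; simp
      simp only [hmapany, Bool.false_eq_true, if_false]
      rw [pvG_of_no_empty c docs PySem.Set.empty false hany']
      exact if_congr hcond rfl ih

theorem pvRewrite_eq_enum (docs : List (List (String × String))) (i : Int) :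
    pvRewrite docs i = (PySem.List.enumerate docs i).map
      (fun p => ((PySem.Dict.ofList p.2).insert "id" (pvFmtId p.1)).items) := by
  induction docs generalizing i with
  | nil => simp [pvRewrite, PySem.List.enumerate_nil]
  | cons d rest ih => simp [pvRewrite, PySem.List.enumerate_cons, ih]

-- ===== VERDICT (by name: the statement is the Claim_ definition above) =====
theorem choose_primary_key_spec : Claim_equal_choose_primary_key := by
  intro documents preferred _
  show choose_primary_key documents preferred = choose_primary_key_alt documents preferred
  unfold choose_primary_key choose_primary_key_alt
  by_cases hp : preferred ≠ ""
  · simp [hp]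
  · simp only [hp, if_false]
    rw [pvFoldl_step, List.map_map]
    have : ((fun e : String × PySem.Set String × Bool => (e.1, pvG e.1 documents e.2.1 e.2.2)) ∘
        fun c => (c, PySem.Set.empty, false)) = fun c => (c, pvG c documents PySem.Set.empty false) := rfl
    rw [this, pvSelect_eq_find]
    cases pvFindCandidate documents ["id", "uid", "_id", "slug", "url", "courseID", "courseId", "course_id"] with
    | some c => rfl
    | none => simp [pvRewrite_eq_enum]
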